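-- pv_equiv track=rewrite | github.com/refiadaya/IztechPythonHomeworks | ceng113_hw2_2.py | count_special_character
-- ===== SOURCE A (Python) =====
-- def count_special_character(text_input,special_input):
--
--     text = list(text_input)
--     special = list(special_input)
--
--     counter = 0
--
--     for x in text :
--         if x in special :
--             counter +=1
--     return counter
-- ===== SOURCE B (Python) =====
-- def count_special_character(text_input, special_input):
--     counts = {}
--     for ch in text_input:
--         counts[ch] = counts.get(ch, 0) + 1
--     total = 0
--     for c in set(special_input):
--         total += counts.get(c, 0)
--     return total
-- ===== Notes on version B (the rewrite author's own statement) =====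
-- stated objective: faster
-- what changed: B builds a frequency table of the text in one pass and then sums the precomputed counts over the distinct special characters, replacing A's per-character linear membership scan of special: O(n*m) becomes O(n+m).
import Mathlib
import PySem

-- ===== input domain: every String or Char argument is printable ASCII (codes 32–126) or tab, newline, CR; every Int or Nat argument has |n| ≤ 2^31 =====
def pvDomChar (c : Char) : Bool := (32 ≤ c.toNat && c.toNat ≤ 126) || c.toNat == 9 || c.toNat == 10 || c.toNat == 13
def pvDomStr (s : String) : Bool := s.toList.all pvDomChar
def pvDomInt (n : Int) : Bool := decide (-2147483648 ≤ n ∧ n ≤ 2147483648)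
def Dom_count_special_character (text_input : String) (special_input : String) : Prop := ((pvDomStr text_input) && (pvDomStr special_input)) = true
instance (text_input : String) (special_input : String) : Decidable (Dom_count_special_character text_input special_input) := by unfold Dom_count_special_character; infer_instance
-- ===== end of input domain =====

-- B replaces A's scan-text-with-membership-test by a one-pass frequency table summed over the distinct special characters (alternative decomposition).

-- ===== PORT A =====
-- for x in text: if x in special: counter += 1
def count_special_character (text_input : String) (special_input : String) : Int :=
  let text := text_input.toList
  let special := special_input.toList
  text.foldl (fun counter x => if x ∈ special then counter + 1 else counter) 0

-- ===== PORT B =====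
-- counts[ch] = counts.get(ch, 0) + 1 over the text, then sum counts.get(c, 0) over set(special)
def count_special_character_alt (text_input : String) (special_input : String) : Int :=
  let counts : PySem.Dict Char Int :=
    text_input.toList.foldl (fun d ch => d.insert ch (d.getD ch 0 + 1)) PySem.Dict.empty
  (PySem.Set.ofList special_input.toList).foldl (fun total c => total + counts.getD c 0) 0

-- ===== PRECONDITION & SPEC =====
def Spec_count_special_character (text_input : String) (special_input : String) (out : Int) : Prop := out = count_special_character_alt text_input special_input
instance (text_input : String) (special_input : String) (out : Int) : Decidable (Spec_count_special_character text_input special_input out) := by unfold Spec_count_special_character; infer_instance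

-- ===== CLAIM (what is proved, stated in full; the proofs are below) =====
def Claim_equal_count_special_character : Prop := ∀ (text_input : String) (special_input : String), Dom_count_special_character text_input special_input → Spec_count_special_character text_input special_input (count_special_character text_input special_input)

-- ===== LEMMAS AND PROOFS =====

-- A's loop counts the text characters satisfying the membership predicate.
theorem foldA_count (p : Char → Prop) [DecidablePred p] :
    ∀ (l : List Char) (n : Int),
      l.foldl (fun c x => if p x then c + 1 else c) n = n + ((l.filter (fun x => decide (p x))).length : Int) := by
  intro l
  induction l with
  | nil => intro n; simp
  | cons x t ih =>
    intro n
    by_cases h : p x <;> simp [List.foldl, h, ih] <;> omega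

-- B's frequency dict looks up to the Lean count.
theorem getD_freq (c : Char) :
    ∀ (l : List Char) (d : PySem.Dict Char Int),
      (l.foldl (fun d ch => d.insert ch (d.getD ch 0 + 1)) d).getD c 0 = d.getD c 0 + (l.count c : Int) := by
  intro l
  induction l with
  | nil => intro d; simp
  | cons x t ih =>
    intro d
    simp only [List.foldl, ih, PySem.Dict.getD_insert, List.count_cons]
    by_cases h : c = x
    · subst h; simp; ring
    · have hx : ¬ x = c := fun e => h e.symm
      simp [h, hx]

-- B's summation loop is a sum of a map.
theorem foldl_add_eq_sum (f : Char → Int) :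
    ∀ (l : List Char) (n : Int), l.foldl (fun acc c => acc + f c) n = n + (l.map f).sum := by
  intro l
  induction l with
  | nil => intro n; simp
  | cons x t ih => intro n; simp [List.foldl, ih]; ring

-- Summing a 0/1 indicator over a duplicate-free list is a membership test.
theorem sum_indicator (x : Char) :
    ∀ (l : List Char), l.Nodup →
      (l.map (fun c => if (x == c) = true then (1 : Int) else 0)).sum = if x ∈ l then 1 else 0 := by
  intro l
  induction l with
  | nil => intro _; simp
  | cons y t ih =>
    intro hn
    have hn' := hn.of_cons
    rw [List.map_cons, List.sum_cons, ih hn']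
    by_cases h : x = y
    · subst h
      have hx : x ∉ t := (List.nodup_cons.mp hn).1
      simp [hx]
    · have hxy : (x == y) = false := by simp [h]
      simp [hxy, h]

-- Summing per-character counts over a duplicate-free list equals filtering by membership.
theorem sum_counts (sp : List Char) (hn : sp.Nodup) :
    ∀ (text : List Char),
      (sp.map (fun c => (text.count c : Int))).sum
        = ((text.filter (fun x => decide (x ∈ sp))).length : Int) := by
  intro text
  induction text with
  | nil => simp
  | cons x t ih =>
    have hmap : sp.map (fun c => (((x :: t).count c : Nat) : Int))
        = sp.map (fun c => (t.count c : Int) + (if (c == x) = true then (1 : Int) else 0)) := by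
      apply List.map_congr_left
      intro c _
      rw [List.count_cons]
      by_cases h : c = x
      · subst h; simp
      · have h1 : (c == x) = false := by simp [h]
        have h2 : (x == c) = false := beq_eq_false_iff_ne.mpr (fun e => h e.symm)
        simp [h1, h2]
    have hswap : (sp.map (fun c => if (x == c) = true then (1 : Int) else 0)).sum
        = (sp.map (fun c => if (c == x) = true then (1 : Int) else 0)).sum := by
      apply congrArg
      apply List.map_congr_left
      intro c _
      by_cases h : c = x
      · subst h; simp
      · have h1 : (x == c) = false := beq_eq_false_iff_ne.mpr (fun e => h e.symm)
        have h2 : (c == x) = false := by simp [h]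
        simp [h1, h2]
    rw [hmap]
    rw [List.sum_map_add (l := sp) (f := fun c => (t.count c : Int))
      (g := fun c => if (c == x) = true then (1 : Int) else 0)]
    rw [ih, ← hswap, sum_indicator x sp hn]
    by_cases h : x ∈ sp <;> simp [h]

-- ===== VERDICT (by name: the statement is the Claim_ definition above) =====
theorem count_special_character_spec : Claim_equal_count_special_character := by
  intro t s _
  unfold Spec_count_special_character count_special_character count_special_character_alt
  simp only
  rw [foldA_count (fun x => x ∈ s.toList) t.toList 0]
  rw [foldl_add_eq_sum (fun c =>
    (t.toList.foldl (fun d ch => d.insert ch (d.getD ch 0 + 1)) PySem.Dict.empty).getD c 0)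
    (PySem.Set.ofList s.toList) 0]
  have hcounts : (PySem.Set.ofList s.toList).map (fun c =>
      (t.toList.foldl (fun d ch => d.insert ch (d.getD ch 0 + 1)) PySem.Dict.empty).getD c 0)
      = (PySem.Set.ofList s.toList).map (fun c => (t.toList.count c : Int)) := by
    apply List.map_congr_left
    intro c _
    rw [getD_freq c t.toList PySem.Dict.empty]
    simp
  rw [hcounts, sum_counts (PySem.Set.ofList s.toList) (PySem.Set.nodup_ofList s.toList) t.toList]
  have hmem : t.toList.filter (fun x => decide (x ∈ s.toList))
      = t.toList.filter (fun x => decide (x ∈ PySem.Set.ofList s.toList)) := by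
    apply List.filter_congr
    intro x _
    simp [PySem.Set.mem_ofList]
  rw [hmem]
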